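-- pv_equiv track=rewrite | github.com/jsatt/advent | 2015/d3/p2.py | process_directions
-- ===== SOURCE A (Python) =====
-- def process_directions(dirs):
--     visited = {(0, 0): True}
--     santa = 0
--     bot = 1
--     current_pos = {santa: (0, 0), bot: (0, 0)}
--     for i, d in enumerate(dirs):
--         x = (i % 2) # even = santa, odd = bot
--
--         if d == '^':
--             current_pos[x] = current_pos[x][0] + 1, current_pos[x][1]
--         elif d == 'v':
--             current_pos[x] = current_pos[x][0] - 1, current_pos[x][1]
--         elif d == '>':
--             current_pos[x] = current_pos[x][0], current_pos[x][1] + 1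
--         elif d == '<':
--             current_pos[x] = current_pos[x][0], current_pos[x][1] - 1
--
--         visited[current_pos[x]] = True
--
--     return len(visited.keys())
-- ===== SOURCE B (Python) =====
-- def process_directions(dirs):
--     deltas = {'^': (1, 0), 'v': (-1, 0), '>': (0, 1), '<': (0, -1)}
--     visited = {(0, 0)}
--     for stream in (dirs[0::2], dirs[1::2]):
--         x, y = 0, 0
--         for d in stream:
--             dx, dy = deltas.get(d, (0, 0))
--             x, y = x + dx, y + dy
--             visited.add((x, y))
--     return len(visited)
-- ===== Notes on version B (the rewrite author's own statement) =====
-- stated objective: alternative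
-- what changed: Instead of one interleaved walk that keeps both movers' positions in a parity-indexed dict and a dict-of-visited, B splits dirs into the two strided streams dirs[0::2] and dirs[1::2] and walks each stream separately from (0,0), accumulating positions in one set via a delta table.
import Mathlib
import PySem

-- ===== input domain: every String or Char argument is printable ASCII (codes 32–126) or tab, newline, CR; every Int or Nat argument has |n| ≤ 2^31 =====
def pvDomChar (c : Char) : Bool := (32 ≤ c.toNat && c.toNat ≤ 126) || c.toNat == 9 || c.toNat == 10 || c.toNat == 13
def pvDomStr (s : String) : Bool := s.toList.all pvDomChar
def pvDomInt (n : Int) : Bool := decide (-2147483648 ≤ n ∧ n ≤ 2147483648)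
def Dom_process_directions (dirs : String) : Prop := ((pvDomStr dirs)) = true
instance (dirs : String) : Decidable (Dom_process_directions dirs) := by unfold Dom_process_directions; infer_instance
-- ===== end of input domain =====

-- B replaces A's single interleaved walk (parity-indexed position dict + visited dict) by two
-- independent walks over the strided streams dirs[0::2] and dirs[1::2] into one visited set
-- (objective: alternative decomposition, same O(n) cost).

-- ===== PORT A =====
-- Loop body of A's 'for i, d in enumerate(dirs)'.  current_pos[x] is read with getD (0,0):
-- x = i % 2 is always a key of current_pos, so Python's KeyError is unreachable and this is exact.
def pvLoopA (st : PySem.Dict (Int × Int) Bool × PySem.Dict Int (Int × Int)) (iv : Int × Char) :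
    PySem.Dict (Int × Int) Bool × PySem.Dict Int (Int × Int) :=
  let x := PySem.Int.mod iv.1 2
  let d := iv.2
  let cur := st.2
  let cur' :=
    if d = '^' then cur.insert x ((cur.getD x (0, 0)).1 + 1, (cur.getD x (0, 0)).2)
    else if d = 'v' then cur.insert x ((cur.getD x (0, 0)).1 - 1, (cur.getD x (0, 0)).2)
    else if d = '>' then cur.insert x ((cur.getD x (0, 0)).1, (cur.getD x (0, 0)).2 + 1)
    else if d = '<' then cur.insert x ((cur.getD x (0, 0)).1, (cur.getD x (0, 0)).2 - 1)
    else cur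
  (st.1.insert (cur'.getD x (0, 0)) true, cur')

def process_directions (dirs : String) : Int :=
  let visited : PySem.Dict (Int × Int) Bool := PySem.Dict.ofList [((0, 0), true)]
  let current_pos : PySem.Dict Int (Int × Int) := PySem.Dict.ofList [(0, (0, 0)), (1, (0, 0))]
  let st := (PySem.List.enumerate dirs.toList 0).foldl pvLoopA (visited, current_pos)
  (st.1.keys.length : Int)

-- ===== PORT B =====
def pvDeltas : PySem.Dict Char (Int × Int) :=
  PySem.Dict.ofList [('^', (1, 0)), ('v', (-1, 0)), ('>', (0, 1)), ('<', (0, -1))]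

-- Inner loop body of B: move by the delta table, record the new position in the set.
def pvLoopB (st : (Int × Int) × PySem.Set (Int × Int)) (d : Char) :
    (Int × Int) × PySem.Set (Int × Int) :=
  let δ := pvDeltas.getD d (0, 0)
  let pos := (st.1.1 + δ.1, st.1.2 + δ.2)
  (pos, PySem.Set.add st.2 pos)

def process_directions_alt (dirs : String) : Int :=
  -- dirs[0::2] and dirs[1::2]; step 2 ≠ 0, so slice? never returns none and .getD "" is exact
  let streams : List String :=
    [(PySem.Str.slice? dirs (some 0) none 2).getD "", (PySem.Str.slice? dirs (some 1) none 2).getD ""]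
  let visited := streams.foldl
    (fun vis stream => (stream.toList.foldl pvLoopB ((0, 0), vis)).2)
    (PySem.Set.ofList [((0 : Int), (0 : Int))])
  PySem.Set.len visited

-- ===== PRECONDITION & SPEC =====
def Spec_process_directions (dirs : String) (out : Int) : Prop := out = process_directions_alt dirs
instance (dirs : String) (out : Int) : Decidable (Spec_process_directions dirs out) := by unfold Spec_process_directions; infer_instance

-- ===== CLAIM (what is proved, stated in full; the proofs are below) =====
def Claim_equal_process_directions : Prop := ∀ (dirs : String), Dom_process_directions dirs → Spec_process_directions dirs (process_directions dirs)

-- ===== LEMMAS AND PROOFS =====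

-- one move of either mover
def pvStep (p : Int × Int) (c : Char) : Int × Int :=
  if c = '^' then (p.1 + 1, p.2)
  else if c = 'v' then (p.1 - 1, p.2)
  else if c = '>' then (p.1, p.2 + 1)
  else if c = '<' then (p.1, p.2 - 1)
  else p

-- positions after each character of a single walk
def pvTrail (p : Int × Int) : List Char → List (Int × Int)
  | [] => []
  | c :: cs => pvStep p c :: pvTrail (pvStep p c) cs

-- positions after each character of the interleaved two-mover walk (p moves first)
def pvMixed (p q : Int × Int) : List Char → List (Int × Int)
  | [] => []
  | c :: cs => pvStep p c :: pvMixed q (pvStep p c) cs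

-- elements at even indices
def pvEvens {α : Type} : List α → List α
  | [] => []
  | [a] => [a]
  | a :: _ :: rest => a :: pvEvens rest

lemma pvEvens_cons {α : Type} (c : α) (cs : List α) :
    pvEvens (c :: cs) = c :: pvEvens cs.tail := by
  cases cs <;> rfl

lemma pvEvens_eq_filterMap {α : Type} (xs : List α) :
    pvEvens xs = (List.range ((xs.length + 1) / 2)).filterMap (fun k => xs[2 * k]?) := by
  induction xs using pvEvens.induct with
  | case1 => simp [pvEvens]
  | case2 a => simp [pvEvens, List.range_succ]
  | case3 a b rest ih =>
    have hn : (rest.length + 2 + 1) / 2 = (rest.length + 1) / 2 + 1 := by omega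
    rw [pvEvens, ih]
    simp only [List.length_cons, hn, List.range_succ_eq_map, List.filterMap_cons,
      List.filterMap_map]
    simp
    apply List.filterMap_congr
    intro k _
    have h : 2 * (k + 1) = 2 * k + 1 + 1 := by omega
    rw [h]
    simp

lemma pvSliceEven {α : Type} (xs : List α) :
    PySem.List.slice? xs (some 0) none 2 = some (pvEvens xs) := by
  rw [pvEvens_eq_filterMap]
  unfold PySem.List.slice? PySem.List.sliceIndices
  norm_num
  have hcnt : (if 0 < xs.length then (((xs.length : Int) + 2 - 1) / 2).toNat else 0)
      = (xs.length + 1) / 2 := by split <;> omega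
  rw [hcnt]
  apply List.filterMap_congr
  intro k _
  have h2k : (2 * (k : Int)).toNat = 2 * k := by omega
  rw [h2k]

lemma pvSliceOdd {α : Type} (xs : List α) :
    PySem.List.slice? xs (some 1) none 2 = some (pvEvens xs.tail) := by
  have htail : pvEvens xs.tail = (List.range (xs.length / 2)).filterMap (fun k => xs[2 * k + 1]?) := by
    rw [pvEvens_eq_filterMap]
    cases xs with
    | nil => simp
    | cons a rest =>
      simp only [List.tail_cons, List.length_cons]
      congr 1
  rw [htail]
  unfold PySem.List.slice? PySem.List.sliceIndices
  norm_num
  cases xs with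
  | nil => simp
  | cons a rest =>
    have hmin : min (1 : Int) (((a :: rest).length : Int)) = 1 := by
      apply min_eq_left
      simp only [List.length_cons]
      push_cast
      omega
    rw [hmin]
    have hcnt : (if 1 < (a :: rest).length then ((((a :: rest).length : Int) - 1 + 2 - 1) / 2).toNat else 0)
        = (a :: rest).length / 2 := by
      simp only [List.length_cons]
      split <;> omega
    rw [hcnt]
    apply List.filterMap_congr
    intro k _
    have h2k : ((1 : Int) + 2 * (k : Int)).toNat = 2 * k + 1 := by omega
    rw [h2k]

lemma pvStream_eq (s : String) (a : Int) (l : List Char)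
    (h : PySem.List.slice? s.toList (some a) none 2 = some l) :
    ((PySem.Str.slice? s (some a) none 2).getD "").toList = l := by
  have hm := PySem.Str.slice?_map s (some a) none 2
  rw [PySem.Chars.slice?_eq_listSlice?, h] at hm
  cases hh : PySem.Str.slice? s (some a) none 2 with
  | none => rw [hh] at hm; simp at hm
  | some t => rw [hh] at hm; simpa using hm

-- dict insert seen through keys is exactly set add
lemma pvKeysInsert (vis : PySem.Dict (Int × Int) Bool) (k : Int × Int) (v : Bool) :
    (vis.insert k v).keys = PySem.Set.add vis.keys k := by
  by_cases h : vis.contains k = true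
  · rw [PySem.Dict.keys_insert_of_contains _ _ h, PySem.Set.add, if_pos]
    simp only [PySem.Set.contains, List.contains_iff_mem]
    exact (PySem.Dict.contains_iff_mem_keys _ _).mp h
  · rw [PySem.Dict.keys_insert_of_not_contains _ _ (by simpa using h), PySem.Set.add, if_neg]
    simp only [PySem.Set.contains, List.contains_iff_mem]
    intro hmem
    exact h ((PySem.Dict.contains_iff_mem_keys _ _).mpr hmem)

lemma pvUpdate_nil {α : Type} [BEq α] (s : PySem.Set α) : PySem.Set.update s [] = s := rfl

lemma pvUpdate_cons {α : Type} [BEq α] (s : PySem.Set α) (x : α) (l : List α) :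
    PySem.Set.update s (x :: l) = PySem.Set.update (PySem.Set.add s x) l := rfl

lemma pvMem_update {α : Type} [BEq α] [LawfulBEq α] (s : PySem.Set α) (l : List α) (y : α) :
    y ∈ PySem.Set.update s l ↔ y ∈ s ∨ y ∈ l := by
  induction l generalizing s with
  | nil => simp
  | cons x l ih =>
    rw [pvUpdate_cons, ih]
    simp [PySem.Set.mem_add]
    tauto

lemma pvNodup_update {α : Type} [BEq α] [LawfulBEq α] (s : PySem.Set α) (l : List α)
    (h : s.Nodup) : (PySem.Set.update s l).Nodup := by
  induction l generalizing s with
  | nil => simpa [pvUpdate_nil]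
  | cons x l ih => rw [pvUpdate_cons]; exact ih _ (PySem.Set.nodup_add _ _ h)

lemma pvUpdate_append {α : Type} [BEq α] (s : PySem.Set α) (l₁ l₂ : List α) :
    PySem.Set.update s (l₁ ++ l₂) = PySem.Set.update (PySem.Set.update s l₁) l₂ := by
  simp [PySem.Set.update, List.foldl_append]

-- B's move equals pvStep
lemma pvStepB (p : Int × Int) (c : Char) :
    (p.1 + (pvDeltas.getD c (0, 0)).1, p.2 + (pvDeltas.getD c (0, 0)).2) = pvStep p c := by
  by_cases h1 : c = '^'
  · subst h1; simp [pvStep, show pvDeltas.getD '^' (0,0) = (1,0) from by decide]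
  by_cases h2 : c = 'v'
  · subst h2; simp [pvStep, show pvDeltas.getD 'v' (0,0) = (-1,0) from by decide, h1]; ring
  by_cases h3 : c = '>'
  · subst h3; simp [pvStep, show pvDeltas.getD '>' (0,0) = (0,1) from by decide, h1, h2]
  by_cases h4 : c = '<'
  · subst h4; simp [pvStep, show pvDeltas.getD '<' (0,0) = (0,-1) from by decide, h1, h2, h3]; ring
  · have hd : pvDeltas.getD c (0, 0) = (0, 0) := by
      rw [PySem.Dict.getD_eq_get?_getD]
      have : pvDeltas.get? c = none := by
        have hmk : pvDeltas = PySem.Dict.mk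
            [('^', (1, 0)), ('v', (-1, 0)), ('>', (0, 1)), ('<', (0, -1))] := by decide
        rw [hmk]
        simp only [PySem.Dict.get?_mk_cons]
        rw [if_neg (by simp [Ne.symm h1]), if_neg (by simp [Ne.symm h2]),
            if_neg (by simp [Ne.symm h3]), if_neg (by simp [Ne.symm h4])]
        rfl
      rw [this]; rfl
    simp [pvStep, hd, h1, h2, h3, h4]

-- B's inner loop is the trail of a single walk, folded into the set
lemma pvWalkB (cs : List Char) : ∀ (p : Int × Int) (vis : PySem.Set (Int × Int)),
    (cs.foldl pvLoopB (p, vis)).2 = PySem.Set.update vis (pvTrail p cs) := by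
  induction cs with
  | nil => intro p vis; simp [pvTrail]
  | cons c cs ih =>
    intro p vis
    have hb : pvLoopB (p, vis) c = (pvStep p c, PySem.Set.add vis (pvStep p c)) := by
      simp [pvLoopB, pvStepB p c]
    rw [List.foldl_cons, hb, ih, pvTrail, pvUpdate_cons]

-- the interleaved walk's positions are a permutation of the two separate walks' positions
lemma pvMixedPerm (cs : List Char) : ∀ (p q : Int × Int),
    (pvMixed p q cs).Perm (pvTrail p (pvEvens cs) ++ pvTrail q (pvEvens cs.tail)) := by
  induction cs with
  | nil => intro p q; simp [pvMixed, pvTrail, pvEvens]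
  | cons c cs ih =>
    intro p q
    rw [pvEvens_cons, List.tail_cons, pvMixed, pvTrail]
    exact List.Perm.cons _ ((ih q (pvStep p c)).trans List.perm_append_comm)

-- A's fold, characterised: visited keys accumulate the interleaved trail
set_option maxHeartbeats 1000000 in
lemma pvFoldA (cs : List Char) : ∀ (i : Int) (vis : PySem.Dict (Int × Int) Bool)
    (cur : PySem.Dict Int (Int × Int)) (p q : Int × Int),
    cur.get? 0 = some p → cur.get? 1 = some q →
    ((PySem.List.enumerate cs i).foldl pvLoopA (vis, cur)).1.keys
      = PySem.Set.update vis.keys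
          (if PySem.Int.mod i 2 = 0 then pvMixed p q cs else pvMixed q p cs) := by
  induction cs with
  | nil =>
    intro i vis cur p q h0 h1
    split <;> simp [pvMixed]
  | cons c cs ih =>
    intro i vis cur p q h0 h1
    rw [PySem.List.enumerate_cons, List.foldl_cons]
    have hmod : PySem.Int.mod i 2 = i % 2 := PySem.Int.mod_eq_emod_of_pos (by norm_num)
    have hmod' : PySem.Int.mod (i + 1) 2 = (i + 1) % 2 := PySem.Int.mod_eq_emod_of_pos (by norm_num)
    by_cases hm : PySem.Int.mod i 2 = 0
    · -- even step: mover p (key 0) moves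
      have hx : PySem.Int.mod i 2 = 0 := hm
      have hgd : cur.getD 0 (0, 0) = p := by
        rw [PySem.Dict.getD_eq_get?_getD, h0]; rfl
      have hla : pvLoopA (vis, cur) (i, c) =
          (vis.insert (pvStep p c) true,
            if c = '^' ∨ c = 'v' ∨ c = '>' ∨ c = '<' then cur.insert 0 (pvStep p c) else cur) := by
        simp only [pvLoopA, hx, hgd, pvStep]
        split_ifs with h1' h2' h3' h4' <;>
          simp_all [PySem.Dict.getD_insert_self]
      rw [hla]
      have hnext : PySem.Int.mod (i + 1) 2 ≠ 0 := by
        rw [hmod'] at *; rw [hmod] at hm; omega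
      by_cases hc : c = '^' ∨ c = 'v' ∨ c = '>' ∨ c = '<'
      · rw [if_pos hc]
        rw [ih (i + 1) _ _ (pvStep p c) q
          (by rw [PySem.Dict.get?_insert_self])
          (by rw [PySem.Dict.get?_insert_of_ne _ _ (by norm_num)]; exact h1)]
        rw [if_neg hnext, if_pos hm, pvMixed, pvUpdate_cons, pvKeysInsert]
      · rw [if_neg hc]
        have hstep : pvStep p c = p := by
          simp only [pvStep]
          rw [not_or, not_or, not_or] at hc
          simp [hc.1, hc.2.1, hc.2.2.1, hc.2.2.2]
        rw [ih (i + 1) _ _ p q h0 h1]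
        rw [if_neg hnext, if_pos hm, pvMixed, hstep, pvUpdate_cons, pvKeysInsert]
    · -- odd step: mover q (key 1) moves
      have hx1 : PySem.Int.mod i 2 = 1 := by rw [hmod] at *; omega
      have hgd : cur.getD 1 (0, 0) = q := by
        rw [PySem.Dict.getD_eq_get?_getD, h1]; rfl
      have hla : pvLoopA (vis, cur) (i, c) =
          (vis.insert (pvStep q c) true,
            if c = '^' ∨ c = 'v' ∨ c = '>' ∨ c = '<' then cur.insert 1 (pvStep q c) else cur) := by
        simp only [pvLoopA, hx1, hgd, pvStep]
        split_ifs with h1' h2' h3' h4' <;>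
          simp_all [PySem.Dict.getD_insert_self]
      rw [hla]
      have hnext : PySem.Int.mod (i + 1) 2 = 0 := by
        rw [hmod'] ; rw [hmod] at hx1; omega
      by_cases hc : c = '^' ∨ c = 'v' ∨ c = '>' ∨ c = '<'
      · rw [if_pos hc]
        rw [ih (i + 1) _ _ p (pvStep q c)
          (by rw [PySem.Dict.get?_insert_of_ne _ _ (by norm_num)]; exact h0)
          (by rw [PySem.Dict.get?_insert_self])]
        rw [if_pos hnext, if_neg hm, pvMixed, pvUpdate_cons, pvKeysInsert]
      · rw [if_neg hc]
        have hstep : pvStep q c = q := by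
          simp only [pvStep]
          rw [not_or, not_or, not_or] at hc
          simp [hc.1, hc.2.1, hc.2.2.1, hc.2.2.2]
        rw [ih (i + 1) _ _ p q h0 h1]
        rw [if_pos hnext, if_neg hm, pvMixed, hstep, pvUpdate_cons, pvKeysInsert]

-- ===== VERDICT (by name: the statement is the Claim_ definition above) =====
theorem process_directions_spec : Claim_equal_process_directions := by
  intro dirs _
  unfold Spec_process_directions
  have hkeys : (PySem.Dict.ofList [((((0:Int)),((0:Int))), true)]).keys
      = [(((0:Int)),((0:Int)))] := by decide
  have hA : process_directions dirs =
      ((PySem.Set.update [(((0:Int)),((0:Int)))] (pvMixed (0,0) (0,0) dirs.toList)).length : Int) := by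
    simp only [process_directions]
    rw [pvFoldA dirs.toList 0 _ _ (0, 0) (0, 0) (by decide) (by decide)]
    rw [if_pos (by decide), hkeys]
  have hB : process_directions_alt dirs =
      ((PySem.Set.update [(((0:Int)),((0:Int)))]
        (pvTrail (0,0) (pvEvens dirs.toList) ++ pvTrail (0,0) (pvEvens dirs.toList.tail))).length : Int) := by
    simp only [process_directions_alt]
    rw [List.foldl_cons, List.foldl_cons, List.foldl_nil]
    rw [pvStream_eq dirs 0 (pvEvens dirs.toList) (pvSliceEven _),
        pvStream_eq dirs 1 (pvEvens dirs.toList.tail) (pvSliceOdd _)]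
    rw [pvWalkB, pvWalkB, ← pvUpdate_append]
    rfl
  rw [hA, hB]
  congr 1
  have hperm := pvMixedPerm dirs.toList (0, 0) (0, 0)
  have hnd : ([(((0:Int)),((0:Int)))] : PySem.Set (Int × Int)).Nodup := by decide
  apply List.Perm.length_eq
  rw [List.perm_ext_iff_of_nodup (pvNodup_update _ _ hnd) (pvNodup_update _ _ hnd)]
  intro a
  rw [pvMem_update, pvMem_update]
  constructor
  · rintro (h | h)
    · exact Or.inl h
    · exact Or.inr (hperm.mem_iff.mp h)
  · rintro (h | h)
    · exact Or.inl h
    · exact Or.inr (hperm.mem_iff.mpr h)
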